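-- pv_equiv track=rewrite | github.com/pauldev-hub/CodeScan-AI | backend/app/services/chat_service.py | _looks_like_code
-- ===== SOURCE A (Python) =====
-- def _looks_like_code(text: str) -> bool:
--     lowered = (text or "").lower()
--     code_markers = (
--         "import ",
--         "def ",
--         "class ",
--         "return ",
--         "from ",
--         "if __name__",
--         "{",
--         "}",
--         ";",
--         "=>",
--         "function ",
--         "const ",
--         "let ",
--         "var ",
--         "public ",
--         "private ",
--     )
--     return any(marker in lowered for marker in code_markers)
-- ===== SOURCE B (Python) =====
-- def _looks_like_code(text: str) -> bool:
--     code_markers = (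
--         "import ",
--         "def ",
--         "class ",
--         "return ",
--         "from ",
--         "if __name__",
--         "{",
--         "}",
--         ";",
--         "=>",
--         "function ",
--         "const ",
--         "let ",
--         "var ",
--         "public ",
--         "private ",
--     )
--     s = text or ""
--     # single left-to-right pass: at each position, try each marker as a
--     # case-insensitive prefix of the remaining text
--     for i in range(len(s)):
--         for m in code_markers:
--             if s[i:i + len(m)].lower() == m:
--                 return True
--     return False
-- ===== Notes on version B (the rewrite author's own statement) =====
-- stated objective: alternative
-- what changed: Replaces the 16 independent substring-membership scans over a pre-lowered copy of the text with one positional left-to-right scan that tests each marker as a case-insensitive prefix at every position, lowering only the window being compared.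
import Mathlib
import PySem

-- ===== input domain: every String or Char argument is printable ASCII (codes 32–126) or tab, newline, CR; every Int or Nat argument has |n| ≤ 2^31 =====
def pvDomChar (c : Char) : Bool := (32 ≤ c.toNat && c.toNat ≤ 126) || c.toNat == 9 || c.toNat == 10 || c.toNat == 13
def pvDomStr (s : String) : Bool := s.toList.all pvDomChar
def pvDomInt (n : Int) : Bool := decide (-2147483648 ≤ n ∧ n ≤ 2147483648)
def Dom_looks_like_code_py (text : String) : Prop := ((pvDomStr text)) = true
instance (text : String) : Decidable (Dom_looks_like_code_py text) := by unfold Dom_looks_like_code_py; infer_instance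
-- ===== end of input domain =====

-- B replaces A's 16 independent substring scans over a pre-lowered copy with one
-- positional left-to-right scan testing each marker as a case-insensitive prefix (alternative).

-- the marker tuple, shared verbatim by both programs
def pvMarkers : List String :=
  ["import ", "def ", "class ", "return ", "from ", "if __name__",
   "{", "}", ";", "=>", "function ", "const ", "let ", "var ",
   "public ", "private "]

-- ===== PORT A =====
-- 'text or ""' is the identity on strings ("" or "" = ""), so it ports to text itself
def looks_like_code_py (text : String) : Bool :=
  let lowered := PySem.Str.lower text
  pvMarkers.any (fun marker => PySem.Chars.isIn marker.toList lowered.toList)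

-- ===== PORT B =====
-- the loop 'for i in range(len(s)): for m in markers: if s[i:i+len(m)].lower() == m: return True'
-- as structural recursion over the tails of the character list
def pvScanB (cs : List Char) : Bool :=
  match cs with
  | [] => false
  | _ :: t =>
    (pvMarkers.any fun m => PySem.Chars.lower (cs.take m.toList.length) == m.toList) || pvScanB t

def looks_like_code_py_alt (text : String) : Bool :=
  pvScanB text.toList

-- ===== PRECONDITION & SPEC =====
def Spec_looks_like_code_py (text : String) (out : Bool) : Prop := out = looks_like_code_py_alt text
instance (text : String) (out : Bool) : Decidable (Spec_looks_like_code_py text out) := by unfold Spec_looks_like_code_py; infer_instance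

-- ===== CLAIM (what is proved, stated in full; the proofs are below) =====
def Claim_equal_looks_like_code_py : Prop := ∀ (text : String), Dom_looks_like_code_py text → Spec_looks_like_code_py text (looks_like_code_py text)

-- ===== LEMMAS AND PROOFS =====

-- the lowered window comparison is exactly a prefix test against the lowered tail
theorem pvWindow_eq_prefix (m : List Char) (cs : List Char) :
    (PySem.Chars.lower (cs.take m.length) == m) = decide (m <+: PySem.Chars.lower cs) := by
  have htake : PySem.Chars.lower (cs.take m.length) = (PySem.Chars.lower cs).take m.length := by
    simp [PySem.Chars.lower, List.map_take]
  rw [htake]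
  rcases Decidable.em (m <+: PySem.Chars.lower cs) with h | h
  · simp [h, (List.prefix_iff_eq_take.mp h).symm]
  · simp only [decide_eq_false h, beq_eq_false_iff_ne, ne_eq]
    intro he
    exact h (List.prefix_iff_eq_take.mpr he.symm)

theorem pvScanB_iff (cs : List Char) :
    pvScanB cs = true ↔ ∃ m ∈ pvMarkers, m.toList <:+: PySem.Chars.lower cs := by
  induction cs with
  | nil =>
    simp only [pvScanB]
    constructor
    · intro h; exact absurd h (by simp)
    · rintro ⟨m, hm, hinf⟩
      have : m.toList = [] := by simpa [PySem.Chars.lower] using List.sublist_nil.mp hinf.sublist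
      fin_cases hm <;> simp_all
  | cons c t ih =>
    simp only [pvScanB, Bool.or_eq_true, List.any_eq_true, ih]
    have hlow : PySem.Chars.lower (c :: t) = PySem.Chars.lowerChar c :: PySem.Chars.lower t := by
      simp [PySem.Chars.lower]
    constructor
    · rintro (⟨m, hm, hw⟩ | ⟨m, hm, hw⟩)
      · refine ⟨m, hm, ?_⟩
        rw [hlow, List.infix_cons_iff]
        exact Or.inl (by rw [pvWindow_eq_prefix] at hw; simpa [hlow] using of_decide_eq_true hw)
      · exact ⟨m, hm, by rw [hlow, List.infix_cons_iff]; exact Or.inr hw⟩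
    · rintro ⟨m, hm, hinf⟩
      rw [hlow, List.infix_cons_iff] at hinf
      rcases hinf with hpre | hinf
      · exact Or.inl ⟨m, hm, by rw [pvWindow_eq_prefix]; exact decide_eq_true (by rw [hlow]; exact hpre)⟩
      · exact Or.inr ⟨m, hm, hinf⟩

-- ===== VERDICT (by name: the statement is the Claim_ definition above) =====
theorem looks_like_code_py_spec : Claim_equal_looks_like_code_py := by
  intro text _
  unfold Spec_looks_like_code_py looks_like_code_py looks_like_code_py_alt
  simp only [PySem.Str.toList_lower]
  rw [Bool.eq_iff_iff]
  rw [pvScanB_iff]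
  simp only [List.any_eq_true, PySem.Chars.isIn_iff_infix]
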